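-- pv_equiv track=rewrite | github.com/lcmd-epfl/rafbl | moltop/descriptors.py | _guess_valence
-- ===== SOURCE A (Python) =====
-- def _guess_valence(an):
--     val = an
--     for period in [2, 8, 8, 18, 18, 32, 32]:
--         if val - period <= 0:
--             break
--         else:
--             val -= period
--     return val
-- ===== SOURCE B (Python) =====
-- import bisect
--
-- _THRESHOLDS = [2, 10, 18, 36, 54, 86, 118]
-- _BEFORE = [0, 2, 10, 18, 36, 54, 86, 118]
--
-- def _guess_valence(an):
--     i = bisect.bisect_left(_THRESHOLDS, an)
--     return an - _BEFORE[i]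
-- ===== Notes on version B (the rewrite author's own statement) =====
-- stated objective: idiomatic
-- what changed: Replaces the subtract-until-it-fits loop over period sizes with a single bisect_left lookup in a precomputed cumulative-boundary table.
import Mathlib
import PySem

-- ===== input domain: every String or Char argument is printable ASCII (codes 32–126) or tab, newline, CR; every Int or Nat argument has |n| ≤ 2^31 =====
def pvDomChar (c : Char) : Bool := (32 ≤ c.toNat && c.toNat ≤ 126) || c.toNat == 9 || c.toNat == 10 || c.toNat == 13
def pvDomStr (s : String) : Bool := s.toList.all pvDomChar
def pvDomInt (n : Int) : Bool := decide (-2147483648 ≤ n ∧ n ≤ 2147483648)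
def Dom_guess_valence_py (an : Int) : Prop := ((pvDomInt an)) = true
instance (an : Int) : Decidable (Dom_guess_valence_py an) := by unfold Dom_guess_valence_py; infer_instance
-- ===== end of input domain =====

-- B replaces A's subtract-until-it-fits loop with a bisect_left lookup in a cumulative-boundary table (idiomatic; same result).
-- ===== PORT A =====
def pvLoopA : List Int → Int → Int
  | [], val => val
  | p :: rest, val => if val - p ≤ 0 then val else pvLoopA rest (val - p)

def guess_valence_py (an : Int) : Int :=
  pvLoopA [2, 8, 8, 18, 18, 32, 32] an

-- ===== PORT B =====
-- bisect.bisect_left on a sorted list = number of elements strictly below an (same index)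
def guess_valence_py_alt (an : Int) : Int :=
  let thresholds : List Int := [2, 10, 18, 36, 54, 86, 118]
  let before : List Int := [0, 2, 10, 18, 36, 54, 86, 118]
  let i := thresholds.countP (fun t => decide (t < an))
  an - before.getD i 0

-- ===== PRECONDITION & SPEC =====
def Spec_guess_valence_py (an : Int) (out : Int) : Prop := out = guess_valence_py_alt an
instance (an : Int) (out : Int) : Decidable (Spec_guess_valence_py an out) := by unfold Spec_guess_valence_py; infer_instance

-- ===== CLAIM (what is proved, stated in full; the proofs are below) =====
def Claim_equal_guess_valence_py : Prop := ∀ (an : Int), Dom_guess_valence_py an → Spec_guess_valence_py an (guess_valence_py an)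

-- ===== LEMMAS AND PROOFS =====
-- canonical piecewise form both ports reduce to
def pvCanon (an : Int) : Int :=
  if an ≤ 2 then an
  else if an ≤ 10 then an - 2
  else if an ≤ 18 then an - 10
  else if an ≤ 36 then an - 18
  else if an ≤ 54 then an - 36
  else if an ≤ 86 then an - 54
  else if an ≤ 118 then an - 86
  else an - 118

set_option maxHeartbeats 2000000 in
theorem pvA_canon (an : Int) : guess_valence_py an = pvCanon an := by
  unfold guess_valence_py pvCanon
  simp only [pvLoopA]
  split_ifs <;> omega

set_option maxHeartbeats 2000000 in
theorem pvB_canon (an : Int) : guess_valence_py_alt an = pvCanon an := by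
  unfold guess_valence_py_alt pvCanon
  simp only [List.countP, List.countP.go, Bool.cond_decide]
  by_cases h1 : 2 < an <;> by_cases h2 : 10 < an <;> by_cases h3 : 18 < an <;>
    by_cases h4 : 36 < an <;> by_cases h5 : 54 < an <;> by_cases h6 : 86 < an <;>
    by_cases h7 : 118 < an <;>
    simp only [h1, h2, h3, h4, h5, h6, h7, if_true, if_false] <;>
    first
      | omega
      | (simp only [List.getD]; split_ifs <;> omega)
      | (norm_num [List.getD]; omega)

-- ===== VERDICT (by name: the statement is the Claim_ definition above) =====
theorem guess_valence_py_spec : Claim_equal_guess_valence_py := by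
  intro an _
  unfold Spec_guess_valence_py
  rw [pvA_canon, pvB_canon]
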